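-- pv_equiv track=rewrite | github.com/Ryahn/ffmpeg_encode | src/core/ffmpeg_bitmap_subtitle_burn.py | _strip_subtitles_filter_from_vf_chain
-- ===== SOURCE A (Python) =====
-- from typing import List, Optional
--
-- def _strip_subtitles_filter_from_vf_chain(vf_chain: str) -> str:
--     """Remove ``subtitles=...`` segments from a comma-separated ``-vf`` chain."""
--     segments: List[str] = []
--     depth = 0
--     start = 0
--     for idx, ch in enumerate(vf_chain):
--         if ch == "(":
--             depth += 1
--         elif ch == ")":
--             depth -= 1
--         elif ch == "," and depth == 0:
--             seg = vf_chain[start:idx].strip()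
--             if seg and not seg.lower().startswith("subtitles="):
--                 segments.append(seg)
--             start = idx + 1
--     tail = vf_chain[start:].strip()
--     if tail and not tail.lower().startswith("subtitles="):
--         segments.append(tail)
--     return ",".join(segments)
-- ===== SOURCE B (Python) =====
-- def _strip_subtitles_filter_from_vf_chain(vf_chain: str) -> str:
--     kept = []
--     buf = []
--     bal = 0
--     for piece in vf_chain.split(','):
--         buf.append(piece)
--         bal += piece.count('(') - piece.count(')')
--         if bal == 0:
--             seg = ','.join(buf).strip()
--             buf = []
--             if seg and not seg.lower().startswith('subtitles='):
--                 kept.append(seg)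
--     if buf:
--         seg = ','.join(buf).strip()
--         if seg and not seg.lower().startswith('subtitles='):
--             kept.append(seg)
--     return ','.join(kept)
-- ===== Notes on version B (the rewrite author's own statement) =====
-- stated objective: faster
-- what changed: B first splits the chain on every comma with str.split, then regroups the pieces with a running parenthesis balance and a piece buffer flushed when the balance returns to 0, instead of A's per-character scan with index bookkeeping and slicing.
import Mathlib
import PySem

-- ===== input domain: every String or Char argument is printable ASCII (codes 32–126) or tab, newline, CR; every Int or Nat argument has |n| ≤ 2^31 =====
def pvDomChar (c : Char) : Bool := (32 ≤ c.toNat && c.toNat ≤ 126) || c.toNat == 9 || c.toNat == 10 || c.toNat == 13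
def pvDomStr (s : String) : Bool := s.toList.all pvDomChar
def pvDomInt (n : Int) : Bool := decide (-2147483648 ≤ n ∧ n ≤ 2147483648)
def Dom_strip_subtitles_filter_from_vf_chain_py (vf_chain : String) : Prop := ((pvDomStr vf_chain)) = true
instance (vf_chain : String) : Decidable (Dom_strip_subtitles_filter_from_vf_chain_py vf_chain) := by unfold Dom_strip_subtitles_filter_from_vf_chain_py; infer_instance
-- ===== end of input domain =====

-- B replaces A's indexed character scan (depth counter + slice bookkeeping) by split-on-comma
-- followed by regrouping the pieces under a running parenthesis balance: an alternative
-- decomposition of the same O(n) task; equivalence is proved for all inputs (both are total).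


-- ===== PORT A =====
-- loop body of A's `for idx, ch in enumerate(vf_chain)` (cs is the full char list being scanned;
-- state = (segments, depth, start))
def pvAStep (cs : List Char) (s : List (List Char) × Int × Int) (p : Int × Char) :
    List (List Char) × Int × Int :=
  if p.2 = '(' then (s.1, s.2.1 + 1, s.2.2)
  else if p.2 = ')' then (s.1, s.2.1 - 1, s.2.2)
  else if p.2 = ',' ∧ s.2.1 = 0 then
    let seg := PySem.Chars.strip (PySem.List.slice cs (some s.2.2) (some p.1))
    (if seg ≠ [] ∧ PySem.Chars.startswith (PySem.Chars.lower seg) "subtitles=".toList = false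
       then s.1 ++ [seg] else s.1, s.2.1, p.1 + 1)
  else s

def strip_subtitles_filter_from_vf_chain_py (vf_chain : String) : String :=
  let cs := vf_chain.toList
  let st := (PySem.List.enumerate cs 0).foldl (pvAStep cs) ([], 0, 0)
  let tail := PySem.Chars.strip (PySem.List.slice cs (some st.2.2) none)
  let segments :=
    if tail ≠ [] ∧ PySem.Chars.startswith (PySem.Chars.lower tail) "subtitles=".toList = false
      then st.1 ++ [tail] else st.1
  String.ofList (PySem.Chars.join [','] segments)

-- ===== PORT B =====
-- loop body of B's `for piece in vf_chain.split(',')` (state = (kept, buf, bal))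
def pvBStep (s : List (List Char) × List (List Char) × Int) (piece : List Char) :
    List (List Char) × List (List Char) × Int :=
  let buf := s.2.1 ++ [piece]
  let bal := s.2.2 + (PySem.Chars.count piece ['('] : Int) - (PySem.Chars.count piece [')'] : Int)
  if bal = 0 then
    let seg := PySem.Chars.strip (PySem.Chars.join [','] buf)
    (if seg ≠ [] ∧ PySem.Chars.startswith (PySem.Chars.lower seg) "subtitles=".toList = false
       then s.1 ++ [seg] else s.1, [], bal)
  else (s.1, buf, bal)

def strip_subtitles_filter_from_vf_chain_py_alt (vf_chain : String) : String :=
  let pieces := PySem.Chars.splitOn vf_chain.toList [',']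
  let st := pieces.foldl pvBStep ([], [], 0)
  let kept :=
    if st.2.1 ≠ [] then
      let seg := PySem.Chars.strip (PySem.Chars.join [','] st.2.1)
      if seg ≠ [] ∧ PySem.Chars.startswith (PySem.Chars.lower seg) "subtitles=".toList = false
        then st.1 ++ [seg] else st.1
    else st.1
  String.ofList (PySem.Chars.join [','] kept)

-- ===== PRECONDITION & SPEC =====
def Spec_strip_subtitles_filter_from_vf_chain_py (vf_chain : String) (out : String) : Prop :=
  out = strip_subtitles_filter_from_vf_chain_py_alt vf_chain
instance (vf_chain : String) (out : String) :
    Decidable (Spec_strip_subtitles_filter_from_vf_chain_py vf_chain out) := by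
  unfold Spec_strip_subtitles_filter_from_vf_chain_py; infer_instance

-- ===== CLAIM (what is proved, stated in full; the proofs are below) =====
def Claim_equal_strip_subtitles_filter_from_vf_chain_py : Prop :=
  ∀ (vf_chain : String), Dom_strip_subtitles_filter_from_vf_chain_py vf_chain →
    Spec_strip_subtitles_filter_from_vf_chain_py vf_chain
      (strip_subtitles_filter_from_vf_chain_py vf_chain)

-- ===== LEMMAS AND PROOFS =====

-- the segment filter both Pythons apply (`seg and not seg.lower().startswith("subtitles=")`)
def pvKeep (seg : List Char) : Bool :=
  decide (seg ≠ []) && !PySem.Chars.startswith (PySem.Chars.lower seg) "subtitles=".toList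

def pvProc (segs : List (List Char)) : List (List Char) :=
  (segs.map PySem.Chars.strip).filter pvKeep

-- reference: split at top-level commas, tracking parenthesis depth
def pvGo : List Char → List Char → Int → List (List Char)
  | [], cur, _ => [cur]
  | c :: rest, cur, depth =>
    if c = '(' then pvGo rest (cur ++ [c]) (depth + 1)
    else if c = ')' then pvGo rest (cur ++ [c]) (depth - 1)
    else if c = ',' ∧ depth = 0 then cur :: pvGo rest [] 0
    else pvGo rest (cur ++ [c]) depth

lemma pvProc_cons (x : List Char) (xs : List (List Char)) :
    pvProc (x :: xs) =
      (if pvKeep (PySem.Chars.strip x) then [PySem.Chars.strip x] else []) ++ pvProc xs := by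
  simp [pvProc, List.filter_cons]; split <;> simp

lemma pvAStep_loop (rest : List Char) : ∀ (done : List Char) (segs : List (List Char)) (depth : Int) (start : Nat),
    start ≤ done.length →
    (let st := (PySem.List.enumerate rest (done.length : Int)).foldl (pvAStep (done ++ rest)) (segs, depth, (start : Int))
     let tail := PySem.Chars.strip (PySem.List.slice (done ++ rest) (some st.2.2) none)
     if tail ≠ [] ∧ PySem.Chars.startswith (PySem.Chars.lower tail) "subtitles=".toList = false
       then st.1 ++ [tail] else st.1)
    = segs ++ pvProc (pvGo rest (done.drop start) depth) := by
  induction rest with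
  | nil =>
    intro done segs depth start h
    simp only [PySem.List.enumerate_nil, List.foldl_nil, List.append_nil, pvGo]
    rw [PySem.List.slice_from_natCast]
    rw [pvProc_cons]
    simp only [pvProc, List.map_nil, List.filter_nil, List.append_nil, pvKeep]
    split <;> rename_i hc
    · rw [if_pos]; simp_all
    · rw [if_neg]; · simp
      simp only [Bool.and_eq_true, decide_eq_true_eq, Bool.not_eq_true'] at hc ⊢
      tauto
  | cons c rest ih =>
    intro done segs depth start h
    rw [PySem.List.enumerate_cons, List.foldl_cons]
    have happ : done ++ c :: rest = (done ++ [c]) ++ rest := by simp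
    have hlen : ((done ++ [c]).length : Int) = (done.length : Int) + 1 := by simp
    by_cases h1 : c = '('
    · subst h1
      rw [happ]
      have := ih (done ++ ['(']) segs (depth + 1) start (by simp; omega)
      rw [hlen] at this
      rw [show pvAStep ((done ++ ['(']) ++ rest) (segs, depth, (start : Int)) ((done.length : Int), '(')
            = (segs, depth + 1, (start : Int)) from rfl]
      rw [this]
      congr 2
      rw [List.drop_append_of_le_length h]
      simp [pvGo]
    by_cases h2 : c = ')'
    · subst h2
      rw [happ]
      have := ih (done ++ [')']) segs (depth - 1) start (by simp; omega)
      rw [hlen] at this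
      rw [show pvAStep ((done ++ [')']) ++ rest) (segs, depth, (start : Int)) ((done.length : Int), ')')
            = (segs, depth - 1, (start : Int)) from rfl]
      rw [this]
      congr 2
      rw [List.drop_append_of_le_length h]
      simp [pvGo]
    by_cases h3 : c = ',' ∧ depth = 0
    · obtain ⟨hc, hd⟩ := h3
      subst hc; subst hd
      rw [happ]
      have hstep : pvAStep ((done ++ [',']) ++ rest) ((segs, 0, (start : Int))) ((done.length : Int), ',')
          = (if PySem.Chars.strip (PySem.List.slice ((done ++ [',']) ++ rest) (some (start : Int)) (some (done.length : Int))) ≠ [] ∧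
                PySem.Chars.startswith (PySem.Chars.lower (PySem.Chars.strip (PySem.List.slice ((done ++ [',']) ++ rest) (some (start : Int)) (some (done.length : Int))))) "subtitles=".toList = false
              then segs ++ [PySem.Chars.strip (PySem.List.slice ((done ++ [',']) ++ rest) (some (start : Int)) (some (done.length : Int)))] else segs,
             0, (done.length : Int) + 1) := by
        simp [pvAStep]
      have hslice : PySem.List.slice ((done ++ [',']) ++ rest) (some (start : Int)) (some (done.length : Int))
          = done.drop start := by
        rw [PySem.List.slice_natCast, List.append_assoc, List.drop_append_of_le_length h,
          List.take_append_of_le_length (by simp)]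
        simp [List.take_of_length_le]
      rw [hstep, hslice]
      set segs' := (if PySem.Chars.strip (done.drop start) ≠ [] ∧
                PySem.Chars.startswith (PySem.Chars.lower (PySem.Chars.strip (done.drop start))) "subtitles=".toList = false
              then segs ++ [PySem.Chars.strip (done.drop start)] else segs) with hsegs'
      have := ih (done ++ [',']) segs' 0 (done ++ [',']).length (le_refl _)
      rw [hlen] at this
      rw [this]
      have hgo : pvGo (',' :: rest) (done.drop start) 0 = (done.drop start) :: pvGo rest [] 0 := by
        simp [pvGo]
      rw [hgo, pvProc_cons]
      rw [List.drop_length]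
      rw [hsegs']
      simp only [pvKeep, Bool.and_eq_true, decide_eq_true_eq, Bool.not_eq_true']
      split <;> simp
    · -- other character (including ',' at nonzero depth)
      rw [happ]
      have := ih (done ++ [c]) segs depth start (by simp; omega)
      rw [hlen] at this
      have hstep : pvAStep ((done ++ [c]) ++ rest) (segs, depth, (start : Int)) ((done.length : Int), c)
          = (segs, depth, (start : Int)) := by
        simp [pvAStep, h1, h2, h3]
      rw [hstep, this]
      congr 2
      rw [List.drop_append_of_le_length h]
      rw [show pvGo (c :: rest) (done.drop start) depth = pvGo rest (done.drop start ++ [c]) depth from by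
        simp [pvGo, h1, h2, h3]]

lemma portA_eq (s : String) :
    strip_subtitles_filter_from_vf_chain_py s
      = String.ofList (PySem.Chars.join [','] (pvProc (pvGo s.toList [] 0))) := by
  have h := pvAStep_loop s.toList [] [] 0 0 (by simp)
  simp only [List.nil_append, List.length_nil, Nat.cast_zero, List.drop_nil] at h
  unfold strip_subtitles_filter_from_vf_chain_py
  exact congrArg String.ofList (congrArg _ h)

-- `piece.count('(')` etc: Chars.count with a one-character needle is List.count
lemma pvCountGo_single (c : Char) : ∀ (fuel : Nat) (l : List Char) (acc : Nat),
    l.length ≤ fuel → PySem.Chars.count.go [c] fuel l acc = acc + l.count c := by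
  intro fuel
  induction fuel with
  | zero =>
    intro l acc h
    have : l = [] := List.eq_nil_of_length_eq_zero (by omega)
    subst this; simp [PySem.Chars.count.go]
  | succ f ih =>
    intro l acc h
    cases l with
    | nil => simp [PySem.Chars.count.go]
    | cons x t =>
      rw [show PySem.Chars.count.go [c] (f + 1) (x :: t) acc
            = if [c].isPrefixOf (x :: t) then PySem.Chars.count.go [c] f (List.drop 1 (x :: t)) (acc + 1)
              else PySem.Chars.count.go [c] f t acc from rfl]
      simp only [List.isPrefixOf, Bool.and_true, List.drop_one, List.tail_cons]
      by_cases hx : c = x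
      · subst hx
        simp only [BEq.rfl, if_pos]
        rw [ih t (acc + 1) (by simpa using h)]
        simp
        omega
      · rw [if_neg (by simp [beq_iff_eq]; exact hx)]
        rw [ih t acc (by simpa using h)]
        simp [Ne.symm hx]

lemma pvCount_single (l : List Char) (c : Char) :
    PySem.Chars.count l [c] = l.count c := by
  rw [show PySem.Chars.count l [c] = PySem.Chars.count.go [c] l.length l 0 from rfl]
  rw [pvCountGo_single c l.length l 0 (le_refl _)]
  simp

-- reference form of `split(',')`
def pvSplitRec (cur : List Char) : List Char → List (List Char)
  | [] => [cur]
  | c :: rest => if c = ',' then cur :: pvSplitRec [] rest else pvSplitRec (cur ++ [c]) rest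

lemma pvSplitGo (fuel : Nat) : ∀ (l cur : List Char) (acc : List (List Char)),
    l.length ≤ fuel →
    PySem.Chars.splitOn.go [','] fuel l cur acc = acc.reverse ++ pvSplitRec cur.reverse l := by
  induction fuel with
  | zero =>
    intro l cur acc h
    have : l = [] := List.eq_nil_of_length_eq_zero (by omega)
    subst this
    simp [PySem.Chars.splitOn.go, pvSplitRec]
  | succ f ih =>
    intro l cur acc h
    cases l with
    | nil => simp [PySem.Chars.splitOn.go, pvSplitRec]
    | cons c rest =>
      rw [show PySem.Chars.splitOn.go [','] (f + 1) (c :: rest) cur acc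
            = if [','].isPrefixOf (c :: rest)
              then PySem.Chars.splitOn.go [','] f (List.drop 1 (c :: rest)) [] (cur.reverse :: acc)
              else PySem.Chars.splitOn.go [','] f rest (c :: cur) acc from rfl]
      simp only [List.isPrefixOf, Bool.and_true, List.drop_one, List.tail_cons]
      by_cases hc : c = ','
      · subst hc
        simp only [BEq.rfl, if_pos]
        rw [ih rest [] (cur.reverse :: acc) (by simpa using h)]
        simp [pvSplitRec]
      · rw [if_neg (by simp [beq_iff_eq]; exact fun a => hc a.symm)]
        rw [ih rest (c :: cur) acc (by simpa using h)]
        simp [pvSplitRec, hc]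

lemma pvSplitOn_eq (l : List Char) :
    PySem.Chars.splitOn l [','] = pvSplitRec [] l := by
  rw [show PySem.Chars.splitOn l [','] = PySem.Chars.splitOn.go [','] (l.length + 1) l [] [] from rfl]
  rw [pvSplitGo (l.length + 1) l [] [] (by omega)]
  simp

lemma pvSplitRec_ne_nil (l cur : List Char) : pvSplitRec cur l ≠ [] := by
  induction l generalizing cur with
  | nil => simp [pvSplitRec]
  | cons c rest ih =>
    simp only [pvSplitRec]
    split
    · simp
    · exact ih _

lemma pvJoin_cons (x : List Char) (ps : List (List Char)) (h : ps ≠ []) :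
    PySem.Chars.join [','] (x :: ps) = x ++ ',' :: PySem.Chars.join [','] ps := by
  cases ps with
  | nil => exact absurd rfl h
  | cons b t => rw [PySem.Chars.join_cons_cons]; simp

lemma pvSplitRec_join (l : List Char) : ∀ cur,
    PySem.Chars.join [','] (pvSplitRec cur l) = cur ++ l := by
  induction l with
  | nil => intro cur; simp [pvSplitRec, PySem.Chars.join_singleton]
  | cons c rest ih =>
    intro cur
    simp only [pvSplitRec]
    by_cases hc : c = ','
    · subst hc
      rw [if_pos rfl, pvJoin_cons _ _ (pvSplitRec_ne_nil _ _), ih []]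
      simp
    · rw [if_neg hc, ih (cur ++ [c])]
      simp

lemma pvSplitRec_comma_free (l : List Char) : ∀ cur, ',' ∉ cur →
    ∀ p ∈ pvSplitRec cur l, ',' ∉ p := by
  induction l with
  | nil => intro cur hcur p hp; simp [pvSplitRec] at hp; subst hp; exact hcur
  | cons c rest ih =>
    intro cur hcur p hp
    simp only [pvSplitRec] at hp
    by_cases hc : c = ','
    · subst hc
      rw [if_pos rfl] at hp
      rcases List.mem_cons.mp hp with h | h
      · subst h; exact hcur
      · exact ih [] (by simp) p h
    · rw [if_neg hc] at hp
      exact ih (cur ++ [c])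
        (by intro hm
            rcases List.mem_append.mp hm with h | h
            · exact hcur h
            · simp at h; exact hc h.symm) p hp

-- the reference scanner swallows a comma-free piece whole, adjusting the depth by its balance
lemma pvGo_piece (p : List Char) : ∀ (rest cur : List Char) (depth : Int), ',' ∉ p →
    pvGo (p ++ rest) cur depth
      = pvGo rest (cur ++ p) (depth + (p.count '(' : Int) - (p.count ')' : Int)) := by
  induction p with
  | nil => intro rest cur depth _; simp
  | cons c p ih =>
    intro rest cur depth hp
    have hc : c ≠ ',' := fun h => hp (h ▸ List.mem_cons_self ..)
    have hp' : ',' ∉ p := fun h => hp (List.mem_cons_of_mem _ h)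
    by_cases h1 : c = '('
    · subst h1
      rw [show pvGo (('(' :: p) ++ rest) cur depth = pvGo (p ++ rest) (cur ++ ['(']) (depth + 1)
            from by simp [pvGo]]
      rw [ih rest (cur ++ ['(']) (depth + 1) hp']
      have h3 : ((('(' :: p).count '(' : Nat) : Int) = (p.count '(' : Int) + 1 := by
        simp
      have h4 : ((('(' :: p).count ')' : Nat) : Int) = (p.count ')' : Int) := by
        simp
      simp only [List.append_assoc, List.singleton_append, h3, h4]
      congr 1
      ring
    · by_cases h2 : c = ')'
      · subst h2
        rw [show pvGo ((')' :: p) ++ rest) cur depth = pvGo (p ++ rest) (cur ++ [')']) (depth - 1)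
              from by simp [pvGo]]
        rw [ih rest (cur ++ [')']) (depth - 1) hp']
        have h3 : (((')' :: p).count '(' : Nat) : Int) = (p.count '(' : Int) := by
          simp
        have h4 : (((')' :: p).count ')' : Nat) : Int) = (p.count ')' : Int) + 1 := by
          simp
        simp only [List.append_assoc, List.singleton_append, h3, h4]
        congr 1
        ring
      · rw [show pvGo ((c :: p) ++ rest) cur depth = pvGo (p ++ rest) (cur ++ [c]) depth
              from by simp [pvGo, h1, h2, hc]]
        rw [ih rest (cur ++ [c]) depth hp']
        have h3 : (((c :: p).count '(' : Nat) : Int) = (p.count '(' : Int) := by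
          simp [h1]
        have h4 : (((c :: p).count ')' : Nat) : Int) = (p.count ')' : Int) := by
          simp [h2]
        simp only [List.append_assoc, List.singleton_append, h3, h4]

-- the scanner's current-segment accumulator corresponding to B's piece buffer
def pvCur (buf : List (List Char)) : List Char :=
  if buf = [] then [] else PySem.Chars.join [','] buf ++ [',']

lemma pvJoin_append_singleton (buf : List (List Char)) : ∀ (p : List Char),
    PySem.Chars.join [','] (buf ++ [p]) = pvCur buf ++ p := by
  induction buf with
  | nil => intro p; simp [pvCur, PySem.Chars.join_singleton]
  | cons b t ih =>
    intro p
    rw [List.cons_append, pvJoin_cons _ _ (by simp), ih p]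
    cases t with
    | nil => simp [pvCur, PySem.Chars.join_singleton]
    | cons b' t' =>
      simp [pvCur, pvJoin_cons _ _ (show b' :: t' ≠ [] by simp)]

lemma pvCur_append (buf : List (List Char)) (p : List Char) :
    pvCur (buf ++ [p]) = pvCur buf ++ p ++ [','] := by
  rw [pvCur, if_neg (by simp), pvJoin_append_singleton]

lemma pvBStep_loop (ps : List (List Char)) :
    ∀ (kept buf : List (List Char)) (bal : Int), ps ≠ [] → (∀ p ∈ ps, ',' ∉ p) →
    (let st := ps.foldl pvBStep (kept, buf, bal)
     if st.2.1 ≠ [] then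
       let seg := PySem.Chars.strip (PySem.Chars.join [','] st.2.1)
       if seg ≠ [] ∧ PySem.Chars.startswith (PySem.Chars.lower seg) "subtitles=".toList = false
         then st.1 ++ [seg] else st.1
     else st.1)
    = kept ++ pvProc (pvGo (PySem.Chars.join [','] ps) (pvCur buf) bal) := by
  induction ps with
  | nil => intro _ _ _ h _; exact absurd rfl h
  | cons p ps ih =>
    intro kept buf bal _ hfree
    have hp : ',' ∉ p := hfree p (List.mem_cons_self ..)
    have hstep : pvBStep (kept, buf, bal) p
        = (let bal' := bal + (PySem.Chars.count p ['('] : Int) - (PySem.Chars.count p [')'] : Int)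
           if bal' = 0 then
             (if PySem.Chars.strip (PySem.Chars.join [','] (buf ++ [p])) ≠ [] ∧
                 PySem.Chars.startswith (PySem.Chars.lower (PySem.Chars.strip (PySem.Chars.join [','] (buf ++ [p])))) "subtitles=".toList = false
               then kept ++ [PySem.Chars.strip (PySem.Chars.join [','] (buf ++ [p]))] else kept, [], bal')
           else (kept, buf ++ [p], bal')) := rfl
    rw [List.foldl_cons, hstep]
    simp only [pvCount_single]
    set bal' : Int := bal + (p.count '(' : Int) - (p.count ')' : Int) with hbal'
    have hjoin : PySem.Chars.join [','] (buf ++ [p]) = pvCur buf ++ p :=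
      pvJoin_append_singleton buf p
    by_cases hb : bal' = 0
    · rw [if_pos hb]
      cases ps with
      | nil =>
        simp only [List.foldl_nil]
        rw [if_neg (by simp)]
        rw [PySem.Chars.join_singleton]
        conv_rhs => rw [show p = p ++ ([] : List Char) from (List.append_nil p).symm]
        rw [pvGo_piece p [] (pvCur buf) bal hp, ← hbal', hb]
        rw [show pvGo [] (pvCur buf ++ p) 0 = [pvCur buf ++ p] from rfl]
        rw [pvProc_cons, hjoin]
        simp only [pvProc, List.map_nil, List.filter_nil, List.append_nil, pvKeep,
          Bool.and_eq_true, decide_eq_true_eq, Bool.not_eq_true']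
        split <;> simp
      | cons q ps' =>
        rw [ih _ [] bal' (by simp) (fun x hx => hfree x (List.mem_cons_of_mem _ hx)), hb]
        rw [pvJoin_cons p (q :: ps') (by simp)]
        rw [pvGo_piece p (',' :: PySem.Chars.join [','] (q :: ps')) (pvCur buf) bal hp,
          ← hbal', hb]
        rw [show pvGo (',' :: PySem.Chars.join [','] (q :: ps')) (pvCur buf ++ p) 0
              = (pvCur buf ++ p) :: pvGo (PySem.Chars.join [','] (q :: ps')) [] 0 from by
            simp [pvGo]]
        rw [pvProc_cons, hjoin]
        rw [show pvCur ([] : List (List Char)) = [] from rfl]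
        simp only [pvKeep, Bool.and_eq_true, decide_eq_true_eq, Bool.not_eq_true']
        split <;> simp
    · rw [if_neg hb]
      cases ps with
      | nil =>
        simp only [List.foldl_nil]
        rw [if_pos (by simp)]
        rw [PySem.Chars.join_singleton]
        conv_rhs => rw [show p = p ++ ([] : List Char) from (List.append_nil p).symm]
        rw [pvGo_piece p [] (pvCur buf) bal hp, ← hbal']
        rw [show pvGo [] (pvCur buf ++ p) (bal') = [pvCur buf ++ p] from rfl]
        rw [pvProc_cons, hjoin]
        simp only [pvProc, List.map_nil, List.filter_nil, List.append_nil, pvKeep,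
          Bool.and_eq_true, decide_eq_true_eq, Bool.not_eq_true']
        split <;> simp
      | cons q ps' =>
        rw [ih _ (buf ++ [p]) bal' (by simp) (fun x hx => hfree x (List.mem_cons_of_mem _ hx))]
        rw [pvCur_append]
        rw [pvJoin_cons p (q :: ps') (by simp)]
        rw [pvGo_piece p (',' :: PySem.Chars.join [','] (q :: ps')) (pvCur buf) bal hp,
          ← hbal']
        rw [show pvGo (',' :: PySem.Chars.join [','] (q :: ps')) (pvCur buf ++ p) bal'
              = pvGo (PySem.Chars.join [','] (q :: ps')) ((pvCur buf ++ p) ++ [',']) bal' from by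
            simp [pvGo, hb]]

lemma portB_eq (s : String) :
    strip_subtitles_filter_from_vf_chain_py_alt s
      = String.ofList (PySem.Chars.join [','] (pvProc (pvGo s.toList [] 0))) := by
  have hsplit := pvSplitOn_eq s.toList
  have h := pvBStep_loop (PySem.Chars.splitOn s.toList [',']) [] [] 0
    (by rw [hsplit]; exact pvSplitRec_ne_nil _ _)
    (by rw [hsplit]; exact pvSplitRec_comma_free _ [] (by simp))
  have hj : PySem.Chars.join [','] (PySem.Chars.splitOn s.toList [',']) = s.toList := by
    rw [hsplit, pvSplitRec_join s.toList []]; simp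
  rw [hj] at h
  simp only [List.nil_append] at h
  rw [show pvCur ([] : List (List Char)) = [] from rfl] at h
  unfold strip_subtitles_filter_from_vf_chain_py_alt
  exact congrArg String.ofList (congrArg _ h)

-- ===== VERDICT (by name: the statement is the Claim_ definition above) =====
theorem strip_subtitles_filter_from_vf_chain_py_spec : Claim_equal_strip_subtitles_filter_from_vf_chain_py := by
  intro s _
  unfold Spec_strip_subtitles_filter_from_vf_chain_py
  rw [portA_eq, portB_eq]
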